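-- pv_equiv track=rewrite | github.com/HunkWhoCodes/CodeSignalSolutions | Intro/8-matrixElementSum.py | solution
-- ===== SOURCE A (Python) =====
-- def solution(matrix):
--     ROWS = len(matrix)
--     COLS = len(matrix[0])
--
--     total = 0
--
--     for i in range(ROWS):
--         for j in range(COLS):
--             if matrix[i][j] != 0:
--                 if i != 0 and matrix[i-1][j] == 0:
--                     matrix[i][j] = 0
--                 if (i!= 0 and matrix[i-1][j] != 0) or i == 0:
--                     total += matrix[i][j]
--
--     return total
-- ===== SOURCE B (Python) =====
-- def solution(matrix):
--     cols = len(matrix[0])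
--     total = 0
--     for j in range(cols):
--         for row in matrix:
--             v = row[j]
--             if v == 0:
--                 break
--             total += v
--     return total
-- ===== Notes on version B (the rewrite author's own statement) =====
-- stated objective: simpler
-- what changed: Replaces A's row-major double loop with in-place zero propagation (zeroing cells below a zero) by a mutation-free column-major scan that breaks at the first zero of each column, skipping the rest of the column and doing no writes; return-value equivalence only (A mutates its argument, B does not).
import Mathlib
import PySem

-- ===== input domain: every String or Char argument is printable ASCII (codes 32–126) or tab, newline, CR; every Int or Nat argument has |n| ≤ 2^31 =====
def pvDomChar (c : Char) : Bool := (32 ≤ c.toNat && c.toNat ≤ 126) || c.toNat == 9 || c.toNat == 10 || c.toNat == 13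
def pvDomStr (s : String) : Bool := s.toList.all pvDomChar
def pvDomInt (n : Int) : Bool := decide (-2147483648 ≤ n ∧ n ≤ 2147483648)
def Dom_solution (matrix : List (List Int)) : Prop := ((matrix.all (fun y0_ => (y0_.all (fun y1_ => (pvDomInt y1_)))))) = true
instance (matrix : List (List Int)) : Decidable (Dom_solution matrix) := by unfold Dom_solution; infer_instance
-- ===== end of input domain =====

-- B sums each column top-down stopping at its first zero (no mutation), instead of A's
-- row-major pass that propagates zeros downwards in place; return values proved equal
-- (A mutates its argument, B does not — only the return value is claimed).


-- ===== PORT A =====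
-- one iteration of A's inner loop body (reads/writes via PySem total forms; Pre_ keeps all indices in range)
def solutionStep (st : List (List Int) × Int) (i j : Int) : List (List Int) × Int :=
  let m := st.1
  let total := st.2
  if PySem.List.pyGetD (PySem.List.pyGetD m i []) j 0 ≠ 0 then
    let m1 := if i ≠ 0 ∧ PySem.List.pyGetD (PySem.List.pyGetD m (i-1) []) j 0 = 0
              then PySem.List.pySetD m i (PySem.List.pySetD (PySem.List.pyGetD m i []) j 0)
              else m
    let total1 := if (i ≠ 0 ∧ PySem.List.pyGetD (PySem.List.pyGetD m1 (i-1) []) j 0 ≠ 0) ∨ i = 0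
                  then total + PySem.List.pyGetD (PySem.List.pyGetD m1 i []) j 0
                  else total
    (m1, total1)
  else st

def solution (matrix : List (List Int)) : Int :=
  let ROWS : Int := (matrix.length : Int)
  let COLS : Int := ((PySem.List.pyGetD matrix 0 []).length : Int)
  ((PySem.List.pyRange 0 ROWS 1).foldl
    (fun st i => (PySem.List.pyRange 0 COLS 1).foldl (fun st j => solutionStep st i j) st)
    (matrix, 0)).2

-- ===== PORT B =====
-- 'for row in matrix: v = row[j]; if v == 0: break; total += v'
def colPrefix (rows : List (List Int)) (j : Nat) : Int :=
  match rows with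
  | [] => 0
  | row :: rest =>
    let v := PySem.List.pyGetD row (j : Int) 0
    if v = 0 then 0 else v + colPrefix rest j

def solution_alt (matrix : List (List Int)) : Int :=
  let cols := (PySem.List.pyGetD matrix 0 []).length
  (List.range cols).foldl (fun total j => total + colPrefix matrix j) 0

-- ===== PRECONDITION & SPEC =====
-- Pre_ excludes exactly the inputs on which A raises IndexError: the empty matrix
-- (matrix[0]) and matrices with a row shorter than the first row (matrix[i][j]).
def Pre_solution (matrix : List (List Int)) : Prop :=
  matrix ≠ [] ∧ ∀ row ∈ matrix, (matrix.headD []).length ≤ row.length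
instance (matrix : List (List Int)) : Decidable (Pre_solution matrix) := by
  unfold Pre_solution; infer_instance
def pvWitness_solution : List (List Int) := [[1, 2], [0, 3]]

def Spec_solution (matrix : List (List Int)) (out : Int) : Prop := out = solution_alt matrix
instance (matrix : List (List Int)) (out : Int) : Decidable (Spec_solution matrix out) := by unfold Spec_solution; infer_instance

-- ===== CLAIM (what is proved, stated in full; the proofs are below) =====
def Claim_equal_solution : Prop := ∀ (matrix : List (List Int)), Dom_solution matrix → Pre_solution matrix → Spec_solution matrix (solution matrix)

-- ===== LEMMAS AND PROOFS =====

-- cell of a matrix, Nat indices, 0 / [] defaults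
def gM (m : List (List Int)) (i j : Nat) : Int := (m.getD i []).getD j 0

-- 'some zero at row t ≤ i in column j'
def blkB (M : List (List Int)) : Nat → Nat → Bool
  | 0, j => gM M 0 j == 0
  | (i+1), j => blkB M i j || (gM M (i+1) j == 0)

-- the amount A adds for cell (i,j); also the value a settled cell holds
def sv (M : List (List Int)) (i j : Nat) : Int := if blkB M i j then 0 else gM M i j

lemma blkB_self (M : List (List Int)) (i j : Nat) (h : gM M i j = 0) : blkB M i j = true := by
  cases i <;> simp [blkB, h]

lemma sv_eq_zero_iff (M : List (List Int)) (i j : Nat) : sv M i j = 0 ↔ blkB M i j = true := by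
  unfold sv
  by_cases h : blkB M i j = true
  · simp [h]
  · simp [h]
    intro hg
    exact h (blkB_self M i j hg)

lemma sv_of_not_blk (M : List (List Int)) (i j : Nat) (h : ¬ blkB M i j = true) :
    sv M i j = gM M i j := by simp [sv, h]

lemma blkB_cons (row : List Int) (rest : List (List Int)) (i j : Nat) :
    blkB (row :: rest) (i+1) j = ((row.getD j 0 == 0) || blkB rest i j) := by
  induction i with
  | zero => simp [blkB, gM]
  | succ i ih =>
      show (blkB (row :: rest) (i+1) j || _) = _
      rw [ih]
      simp [blkB, gM, Bool.or_assoc]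

lemma colPrefix_eq_sum (M : List (List Int)) (j : Nat) :
    colPrefix M j = ∑ i ∈ Finset.range M.length, sv M i j := by
  induction M with
  | nil => simp [colPrefix]
  | cons row rest ih =>
      have hv : PySem.List.pyGetD row (j : Int) 0 = row[j]?.getD 0 := by
        simp [PySem.List.pyGetD_natCast, List.getD_eq_getElem?_getD]
      by_cases h0 : row[j]?.getD 0 = 0
      · have hall : ∀ i, sv (row :: rest) i j = 0 := by
          intro i
          cases i with
          | zero =>
              apply (sv_eq_zero_iff _ _ _).2
              apply blkB_self
              simpa [gM, List.getD_eq_getElem?_getD] using h0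
          | succ i =>
              apply (sv_eq_zero_iff _ _ _).2
              rw [blkB_cons]
              simp [h0]
        rw [show colPrefix (row :: rest) j = 0 by simp [colPrefix, hv, h0]]
        simp [hall]
      · have hz : sv (row :: rest) 0 j = row[j]?.getD 0 := by
          have hb : blkB (row :: rest) 0 j = false := by simp [blkB, gM, h0]
          simp [sv, hb, gM]
        have hs : ∀ i, sv (row :: rest) (i+1) j = sv rest i j := by
          intro i
          simp only [sv, blkB_cons]
          have he : ((row.getD j 0 == 0) || blkB rest i j) = blkB rest i j := by
            simp [h0]
          rw [he]
          rcases Bool.eq_false_or_eq_true (blkB rest i j) with hb | hb <;>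
            simp [hb, gM]
        calc colPrefix (row :: rest) j
            = row[j]?.getD 0 + colPrefix rest j := by simp [colPrefix, hv, h0]
          _ = ∑ i ∈ Finset.range (rest.length + 1), sv (row :: rest) i j := by
              rw [Finset.sum_range_succ' (fun i => sv (row :: rest) i j)]
              simp only [hs, hz, ih]
              ring
          _ = _ := by simp

lemma sum_map_range (f : Nat → Int) (n : Nat) :
    ((List.range n).map f).sum = ∑ j ∈ Finset.range n, f j := by
  induction n with
  | zero => simp
  | succ n ih => rw [List.range_succ, Finset.sum_range_succ]; simp [ih]

-- B's fold is the sum of the column prefixes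
lemma alt_eq_sum (M : List (List Int)) :
    solution_alt M = ∑ j ∈ Finset.range (PySem.List.pyGetD M 0 []).length, colPrefix M j := by
  unfold solution_alt
  rw [PySem.List.foldl_add (g := fun j => colPrefix M j)]
  rw [sum_map_range]
  ring

-- the inner pass of A over columns c..C-1 of row i
lemma inner_pass (M : List (List Int)) (C : Nat)
    (hC : ∀ k, k < M.length → C ≤ (M.getD k []).length) :
    ∀ (d c : Nat) (m : List (List Int)) (t : Int) (i : Nat), C = c + d → i < M.length →
    m.length = M.length →
    (∀ k, (m.getD k []).length = (M.getD k []).length) →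
    (∀ j, j < C → 1 ≤ i → gM m (i-1) j = sv M (i-1) j) →
    (∀ j, c ≤ j → gM m i j = gM M i j) →
    (∀ j, j < c → gM m i j = sv M i j) →
    ∃ m',
      ((PySem.List.pyRange (c : Int) (C : Int) 1).foldl
        (fun st j => solutionStep st (i : Int) j) (m, t))
        = (m', t + ∑ j ∈ Finset.Ico c C, sv M i j) ∧
      m'.length = M.length ∧
      (∀ k, (m'.getD k []).length = (M.getD k []).length) ∧
      (∀ k, k ≠ i → m'.getD k [] = m.getD k []) ∧
      (∀ j, j < C → gM m' i j = sv M i j) := by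
  intro d
  induction d with
  | zero =>
      intro c m t i hCc hi hlen hrlen hprev hhi hlo
      rw [PySem.List.pyRange_one_eq_nil (by exact_mod_cast (by omega : C ≤ c))]
      refine ⟨m, ?_, hlen, hrlen, fun _ _ => rfl, ?_⟩
      · have : Finset.Ico c C = ∅ := Finset.Ico_eq_empty (by omega)
        simp [this]
      · intro j hj; exact hlo j (by omega)
  | succ d ih =>
      intro c m t i hCc hi hlen hrlen hprev hhi hlo
      have hcC : c < C := by omega
      have hcCi : (c : Int) < (C : Int) := by exact_mod_cast hcC
      rw [PySem.List.pyRange_one_cons hcCi]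
      have hc1 : ((c : Int) + 1) = ((c + 1 : Nat) : Int) := by push_cast; ring
      rw [List.foldl_cons, hc1]
      have hvc : gM m i c = gM M i c := hhi c (le_refl c)
      have hstep_get : PySem.List.pyGetD (PySem.List.pyGetD m (i : Int) []) (c : Int) 0 = gM m i c := by
        simp only [PySem.List.pyGetD_natCast]; rfl
      by_cases hv0 : gM M i c = 0
      · -- cell is zero: A skips it entirely
        have hstep : solutionStep (m, t) (i : Int) (c : Int) = (m, t) := by
          have hcond : ¬ (PySem.List.pyGetD (PySem.List.pyGetD m (i : Int) []) (c : Int) 0 ≠ 0) := by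
            rw [hstep_get, hvc, hv0]; simp
          simp only [solutionStep]
          rw [if_neg hcond]
        rw [hstep]
        have hsvc : sv M i c = 0 := (sv_eq_zero_iff M i c).2 (blkB_self M i c hv0)
        obtain ⟨m', hfold, h1, h2, h3, h4⟩ :=
          ih (c + 1) m t i (by omega) hi hlen hrlen hprev
            (fun j hj => hhi j (by omega))
            (fun j hj => by
              rcases Nat.lt_succ_iff_lt_or_eq.1 hj with h | h
              · exact hlo j h
              · subst h; rw [hvc, hv0, hsvc])
        refine ⟨m', ?_, h1, h2, h3, h4⟩
        rw [hfold, Finset.sum_eq_sum_Ico_succ_bot hcC, hsvc]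
        ring_nf
      · -- cell is nonzero
        have hcond1 : PySem.List.pyGetD (PySem.List.pyGetD m (i : Int) []) (c : Int) 0 ≠ 0 := by
          rw [hstep_get, hvc]; exact hv0
        by_cases hi0 : i = 0
        · -- first row: no mutation, always added
          subst hi0
          have hblk : blkB M 0 c = false := by simp [blkB, hv0]
          have hsvc : sv M 0 c = gM M 0 c := sv_of_not_blk M 0 c (by simp [hblk])
          have hstep : solutionStep (m, t) ((0 : Nat) : Int) (c : Int) = (m, t + gM M 0 c) := by
            have h2 : ¬ ((((0 : Nat) : Int) ≠ 0) ∧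
                PySem.List.pyGetD (PySem.List.pyGetD m (((0 : Nat) : Int) - 1) []) (c : Int) 0 = 0) :=
              fun h => h.1 (by norm_cast)
            have h3 : ((((0 : Nat) : Int) ≠ 0) ∧
                PySem.List.pyGetD (PySem.List.pyGetD m (((0 : Nat) : Int) - 1) []) (c : Int) 0 ≠ 0) ∨
                (((0 : Nat) : Int) = 0) := Or.inr (by norm_cast)
            simp only [solutionStep]
            rw [if_pos hcond1, if_neg h2, if_pos h3, hstep_get, hvc]
          rw [hstep]
          obtain ⟨m', hfold, h1, h2, h3, h4⟩ :=
            ih (c + 1) m (t + gM M 0 c) 0 (by omega) hi hlen hrlen hprev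
              (fun j hj => hhi j (by omega))
              (fun j hj => by
                rcases Nat.lt_succ_iff_lt_or_eq.1 hj with h | h
                · exact hlo j h
                · subst h; rw [hvc, hsvc])
          refine ⟨m', ?_, h1, h2, h3, h4⟩
          rw [hfold, Finset.sum_eq_sum_Ico_succ_bot hcC, hsvc]
          ring_nf
        · -- i ≥ 1: behaviour depends on the settled cell above
          have hi1 : 1 ≤ i := Nat.one_le_iff_ne_zero.2 hi0
          obtain ⟨i', rfl⟩ : ∃ i', i = i' + 1 := ⟨i - 1, by omega⟩
          have hprevc : gM m i' c = sv M i' c := by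
            simpa using hprev c hcC hi1
          have hii : ((i' + 1 : Nat) : Int) ≠ 0 := by positivity
          have hisub : ((i' + 1 : Nat) : Int) - 1 = ((i' : Nat) : Int) := by push_cast; ring
          have habove : PySem.List.pyGetD (PySem.List.pyGetD m (((i' + 1 : Nat) : Int) - 1) []) (c : Int) 0
              = sv M i' c := by
            rw [hisub]
            simp only [PySem.List.pyGetD_natCast]
            exact hprevc
          have hblk_succ : blkB M (i' + 1) c = (blkB M i' c || (gM M (i' + 1) c == 0)) := rfl
          have hilen : i' + 1 < m.length := by rw [hlen]; exact hi
          have hclen : c < (m.getD (i' + 1) []).length := by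
            rw [hrlen]; exact lt_of_lt_of_le hcC (hC _ hi)
          by_cases hu0 : sv M i' c = 0
          · -- blocked above: A zeroes the cell and adds nothing
            have hblk' : blkB M i' c = true := (sv_eq_zero_iff M i' c).1 hu0
            have hblk : blkB M (i' + 1) c = true := by rw [hblk_succ, hblk']; simp
            have hsvc : sv M (i' + 1) c = 0 := (sv_eq_zero_iff M (i' + 1) c).2 hblk
            have hm1 : PySem.List.pySetD m ((i' + 1 : Nat) : Int)
                  (PySem.List.pySetD (PySem.List.pyGetD m ((i' + 1 : Nat) : Int) []) (c : Int) 0)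
                = m.set (i' + 1) ((m.getD (i' + 1) []).set c 0) := by
              simp only [PySem.List.pySetD_natCast, PySem.List.pyGetD_natCast]
            set m1 : List (List Int) := m.set (i' + 1) ((m.getD (i' + 1) []).set c 0) with hm1def
            have hm1k : ∀ k, k ≠ i' + 1 → m1.getD k [] = m.getD k [] := by
              intro k hk
              rw [hm1def]
              simp [List.getD_eq_getElem?_getD, (Ne.symm hk)]
            have hm1i : m1.getD (i' + 1) [] = (m.getD (i' + 1) []).set c 0 := by
              rw [hm1def]
              simp [List.getD_eq_getElem?_getD, hilen]
            have hm1len : m1.length = M.length := by rw [hm1def]; simp [List.length_set]; exact hlen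
            have hm1rlen : ∀ k, (m1.getD k []).length = (M.getD k []).length := by
              intro k
              by_cases hk : k = i' + 1
              · subst hk; rw [hm1i]; simp [List.length_set]; exact hrlen _
              · rw [hm1k k hk]; exact hrlen k
            have hm1row : ∀ j, j ≠ c → gM m1 (i' + 1) j = gM m (i' + 1) j := by
              intro j hj
              unfold gM
              rw [hm1i]
              simp [List.getD_eq_getElem?_getD, (Ne.symm hj)]
            have hclen' : c < (m[i' + 1]?.getD []).length := by
              simpa [List.getD_eq_getElem?_getD] using hclen
            have hm1c : gM m1 (i' + 1) c = 0 := by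
              unfold gM
              rw [hm1i]
              simp [List.getD_eq_getElem?_getD, hclen']
            have habove1 : PySem.List.pyGetD (PySem.List.pyGetD m1 (((i' + 1 : Nat) : Int) - 1) []) (c : Int) 0
                = sv M i' c := by
              rw [hisub]
              simp only [PySem.List.pyGetD_natCast]
              rw [hm1k i' (by omega)]
              exact hprevc
            have hstep : solutionStep (m, t) ((i' + 1 : Nat) : Int) (c : Int) = (m1, t) := by
              have hcond2 : ((i' + 1 : Nat) : Int) ≠ 0 ∧
                  PySem.List.pyGetD (PySem.List.pyGetD m (((i' + 1 : Nat) : Int) - 1) []) (c : Int) 0 = 0 :=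
                ⟨hii, by rw [habove]; exact hu0⟩
              have hcond3 : ¬ ((((i' + 1 : Nat) : Int) ≠ 0 ∧
                  PySem.List.pyGetD (PySem.List.pyGetD m1 (((i' + 1 : Nat) : Int) - 1) []) (c : Int) 0 ≠ 0) ∨
                  (((i' + 1 : Nat) : Int) = 0)) := by
                rintro (⟨_, hne2⟩ | h0)
                · exact hne2 (by rw [habove1]; exact hu0)
                · exact hii h0
              simp only [solutionStep]
              rw [if_pos hcond1, if_pos hcond2, hm1, if_neg hcond3]
            rw [hstep]
            obtain ⟨m', hfold, h1, h2, h3, h4⟩ :=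
              ih (c + 1) m1 t (i' + 1) (by omega) hi hm1len hm1rlen
                (fun j hj h1i => by
                  have hg : gM m1 i' j = gM m i' j := by
                    unfold gM; rw [hm1k i' (by omega)]
                  simpa [hg] using hprev j hj h1i)
                (fun j hj => by
                  rw [hm1row j (by omega)]
                  exact hhi j (by omega))
                (fun j hj => by
                  rcases Nat.lt_succ_iff_lt_or_eq.1 hj with h | h
                  · rw [hm1row j (by omega)]; exact hlo j h
                  · subst h; rw [hm1c, hsvc])
            refine ⟨m', ?_, h1, h2, ?_, h4⟩
            · rw [hfold, Finset.sum_eq_sum_Ico_succ_bot hcC, hsvc]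
              ring_nf
            · intro k hk
              rw [h3 k hk]
              exact hm1k k hk
          · -- not blocked above: no mutation, value added
            have hblk' : blkB M i' c = false := by
              cases hb : blkB M i' c
              · rfl
              · exact absurd ((sv_eq_zero_iff M i' c).2 hb) hu0
            have hblk : blkB M (i' + 1) c = false := by
              rw [hblk_succ, hblk']
              simp [hv0]
            have hsvc : sv M (i' + 1) c = gM M (i' + 1) c :=
              sv_of_not_blk M (i' + 1) c (by simp [hblk])
            have hstep : solutionStep (m, t) ((i' + 1 : Nat) : Int) (c : Int)
                = (m, t + gM M (i' + 1) c) := by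
              have h2 : ¬ ((((i' + 1 : Nat) : Int) ≠ 0) ∧
                  PySem.List.pyGetD (PySem.List.pyGetD m (((i' + 1 : Nat) : Int) - 1) []) (c : Int) 0 = 0) := by
                rintro ⟨_, h0⟩
                exact hu0 (by rw [← habove]; exact h0)
              have h3 : ((((i' + 1 : Nat) : Int) ≠ 0) ∧
                  PySem.List.pyGetD (PySem.List.pyGetD m (((i' + 1 : Nat) : Int) - 1) []) (c : Int) 0 ≠ 0) ∨
                  (((i' + 1 : Nat) : Int) = 0) :=
                Or.inl ⟨hii, by rw [habove]; exact hu0⟩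
              simp only [solutionStep]
              rw [if_pos hcond1, if_neg h2, if_pos h3, hstep_get, hvc]
            rw [hstep]
            obtain ⟨m', hfold, h1, h2, h3, h4⟩ :=
              ih (c + 1) m (t + gM M (i' + 1) c) (i' + 1) (by omega) hi hlen hrlen hprev
                (fun j hj => hhi j (by omega))
                (fun j hj => by
                  rcases Nat.lt_succ_iff_lt_or_eq.1 hj with h | h
                  · exact hlo j h
                  · subst h; rw [hvc, hsvc])
            refine ⟨m', ?_, h1, h2, h3, h4⟩
            rw [hfold, Finset.sum_eq_sum_Ico_succ_bot hcC, hsvc]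
            ring_nf

-- the outer pass of A over the first r rows
lemma outer_pass (M : List (List Int)) (C : Nat)
    (hC : ∀ k, k < M.length → C ≤ (M.getD k []).length) :
    ∀ (r : Nat), r ≤ M.length →
    ∃ m',
      ((PySem.List.pyRange 0 (r : Int) 1).foldl
        (fun st i => (PySem.List.pyRange 0 (C : Int) 1).foldl
          (fun st j => solutionStep st i j) st) (M, 0))
        = (m', ∑ i ∈ Finset.range r, ∑ j ∈ Finset.range C, sv M i j) ∧
      m'.length = M.length ∧
      (∀ k, (m'.getD k []).length = (M.getD k []).length) ∧
      (∀ k, r ≤ k → m'.getD k [] = M.getD k []) ∧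
      (∀ k j, k < r → j < C → gM m' k j = sv M k j) := by
  intro r
  induction r with
  | zero =>
      intro _
      rw [show ((0 : Nat) : Int) = (0 : Int) by norm_cast,
          PySem.List.pyRange_one_eq_nil (le_refl 0)]
      exact ⟨M, by simp, rfl, fun _ => rfl, fun _ _ => rfl, fun k j hk _ => absurd hk (Nat.not_lt_zero k)⟩
  | succ r ih =>
      intro hr
      obtain ⟨m1, hfold1, h1, h2, h3, h4⟩ := ih (by omega)
      have hcast : ((r + 1 : Nat) : Int) = ((r : Nat) : Int) + 1 := by push_cast; ring
      rw [hcast, PySem.List.pyRange_one_succ_right (by positivity), List.foldl_append, hfold1,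
          List.foldl_cons, List.foldl_nil]
      have hrM : r < M.length := by omega
      obtain ⟨m2, hfold2, g1, g2, g3, g4⟩ :=
        inner_pass M C hC C 0 m1 (∑ i ∈ Finset.range r, ∑ j ∈ Finset.range C, sv M i j) r
          (by omega) hrM h1 h2
          (fun j hj h1r => by
            have := h4 (r - 1) j (by omega) hj
            exact this)
          (fun j _ => by
            unfold gM
            rw [h3 r (le_refl r)])
          (fun j hj => absurd hj (Nat.not_lt_zero j))
      rw [show ((0 : Nat) : Int) = (0 : Int) by norm_cast] at hfold2
      rw [hfold2]
      refine ⟨m2, ?_, g1, g2, ?_, ?_⟩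
      · rw [Finset.sum_range_succ]
        congr 1
        rw [← Finset.range_eq_Ico]
      · intro k hk
        rw [g3 k (by omega)]
        exact h3 k (by omega)
      · intro k j hk hj
        rcases Nat.lt_succ_iff_lt_or_eq.1 hk with h | h
        · unfold gM
          rw [g3 k (by omega)]
          exact h4 k j h hj
        · subst h
          exact g4 j hj

-- ===== VERDICT (by name: the statement is the Claim_ definition above) =====
theorem solution_spec : Claim_equal_solution := by
  intro M _hDom hPre
  obtain ⟨hne, hrows⟩ := hPre
  unfold Spec_solution
  have hC0 : (PySem.List.pyGetD M 0 []) = M.getD 0 [] := by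
    simpa using PySem.List.pyGetD_natCast M 0 []
  have hC : ∀ k, k < M.length → (PySem.List.pyGetD M 0 []).length ≤ (M.getD k []).length := by
    intro k hk
    have hmem : M.getD k [] ∈ M := by
      rw [List.getD_eq_getElem?_getD, List.getElem?_eq_getElem hk]
      exact List.getElem_mem hk
    have hhead : M.headD [] = M.getD 0 [] := by
      cases M with
      | nil => simp at hne
      | cons a l => simp
    rw [hC0, ← hhead]
    exact hrows _ hmem
  obtain ⟨m', hfold, _, _, _, _⟩ :=
    outer_pass M (PySem.List.pyGetD M 0 []).length hC M.length (le_refl _)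
  have hA : solution M =
      (((PySem.List.pyRange 0 (M.length : Int) 1).foldl
        (fun st i => (PySem.List.pyRange 0 (((PySem.List.pyGetD M 0 []).length : Nat) : Int) 1).foldl
          (fun st j => solutionStep st i j) st) (M, 0))).2 := rfl
  rw [hA, hfold]
  show (∑ i ∈ Finset.range M.length, ∑ j ∈ Finset.range (PySem.List.pyGetD M 0 []).length, sv M i j)
      = solution_alt M
  rw [alt_eq_sum, Finset.sum_comm]
  exact Finset.sum_congr rfl (fun j _ => (colPrefix_eq_sum M j).symm)
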